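-- pv_equiv track=rewrite | github.com/SimSimEEE/crafton_jungle_algorithm | 프로그래머스/unrated/148653. 마법의 엘리베이터/마법의 엘리베이터.py | solution
-- ===== SOURCE A (Python) =====
-- def solution(storey):
--     answer = 0
--     while storey > 0:
--         tmp = storey % 10
--         storey //= 10
--         if tmp > 5:
--             storey += 1
--             tmp = 10 - tmp
--         elif tmp == 5:
--             if storey%10 >= 5:
--                 storey+=1
--         answer += tmp
--     return answer
-- ===== SOURCE B (Python) =====
-- def solution(storey):
--     def f(s):
--         if s <= 0:
--             return 0
--         if s == 1:
--             return 1
--         d, q = s % 10, s // 10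
--         return min(d + f(q), (10 - d) + f(q + 1))
--     return f(storey)
-- ===== Notes on version B (the rewrite author's own statement) =====
-- stated objective: alternative
-- what changed: Replaces A's greedy single-pass loop with its lookahead tie-break by a branching recursion over the decimal digits that takes the minimum of pressing down and pressing up with a carry at each digit.
import Mathlib
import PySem

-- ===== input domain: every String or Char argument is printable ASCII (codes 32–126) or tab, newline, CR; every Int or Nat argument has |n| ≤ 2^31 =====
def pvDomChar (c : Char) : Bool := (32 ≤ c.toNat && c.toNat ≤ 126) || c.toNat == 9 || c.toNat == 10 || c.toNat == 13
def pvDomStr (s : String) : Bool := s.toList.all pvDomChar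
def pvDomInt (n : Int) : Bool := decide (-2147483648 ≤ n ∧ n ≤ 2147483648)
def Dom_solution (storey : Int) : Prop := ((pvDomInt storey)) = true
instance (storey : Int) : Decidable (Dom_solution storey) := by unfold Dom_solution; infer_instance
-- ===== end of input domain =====

-- B replaces A's greedy single pass (with ==5 lookahead tie-break) by a branching
-- recursion over the digits taking the min of press-down and press-up-with-carry;
-- objective: alternative (not faster).

-- ===== PORT A =====
-- termination helpers for the while loop (cited by decreasing_by)
theorem pv_fd_lt (s : Int) (h0 : 0 < s) :
    (PySem.Int.floordiv s 10).toNat < s.toNat := by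
  rw [PySem.Int.floordiv_eq_ediv_of_pos (by omega : (0:Int) < 10)]; omega

theorem pv_fd1_lt (s : Int) (h0 : 0 < s) (h5 : 5 ≤ PySem.Int.mod s 10) :
    (PySem.Int.floordiv s 10 + 1).toNat < s.toNat := by
  rw [PySem.Int.floordiv_eq_ediv_of_pos (by omega : (0:Int) < 10)]
  rw [PySem.Int.mod_eq_emod_of_pos (by omega : (0:Int) < 10)] at h5
  omega

-- the while loop of A, with the running `answer` accumulator
def solution_go (storey answer : Int) : Int :=
  if h0 : 0 < storey then
    if h1 : PySem.Int.mod storey 10 > 5 then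
      solution_go (PySem.Int.floordiv storey 10 + 1)
        (answer + (10 - PySem.Int.mod storey 10))
    else if h2 : PySem.Int.mod storey 10 = 5 then
      if PySem.Int.mod (PySem.Int.floordiv storey 10) 10 ≥ 5 then
        solution_go (PySem.Int.floordiv storey 10 + 1) (answer + PySem.Int.mod storey 10)
      else
        solution_go (PySem.Int.floordiv storey 10) (answer + PySem.Int.mod storey 10)
    else
      solution_go (PySem.Int.floordiv storey 10) (answer + PySem.Int.mod storey 10)
  else answer
termination_by storey.toNat
decreasing_by
  · exact pv_fd1_lt _ h0 (by omega)
  · exact pv_fd1_lt _ h0 (by omega)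
  · exact pv_fd_lt _ h0
  · exact pv_fd_lt _ h0

def solution (storey : Int) : Int := solution_go storey 0

-- ===== PORT B =====
-- termination helper for fAlt (cited by decreasing_by)
theorem pv_fd1_lt' (s : Int) (h2 : 2 ≤ s) :
    (PySem.Int.floordiv s 10 + 1).toNat < s.toNat := by
  rw [PySem.Int.floordiv_eq_ediv_of_pos (by omega : (0:Int) < 10)]; omega

-- the inner recursion f of Source B
def fAlt (s : Int) : Int :=
  if h0 : s ≤ 0 then 0
  else if h1 : s = 1 then 1
  else
    min (PySem.Int.mod s 10 + fAlt (PySem.Int.floordiv s 10))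
        ((10 - PySem.Int.mod s 10) + fAlt (PySem.Int.floordiv s 10 + 1))
termination_by s.toNat
decreasing_by
  · exact pv_fd_lt _ (by omega)
  · exact pv_fd1_lt' _ (by omega)

def solution_alt (storey : Int) : Int := fAlt storey

-- ===== PRECONDITION & SPEC =====
def Spec_solution (storey : Int) (out : Int) : Prop := out = solution_alt storey
instance (storey : Int) (out : Int) : Decidable (Spec_solution storey out) := by unfold Spec_solution; infer_instance

-- ===== CLAIM (what is proved, stated in full; the proofs are below) =====
def Claim_equal_solution : Prop := ∀ (storey : Int), Dom_solution storey → Spec_solution storey (solution storey)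

-- ===== LEMMAS AND PROOFS =====

theorem fAlt_nonpos (s : Int) (h : s ≤ 0) : fAlt s = 0 := by
  rw [fAlt]; simp [h]

theorem fAlt_zero : fAlt 0 = 0 := fAlt_nonpos 0 le_rfl

theorem fAlt_one : fAlt 1 = 1 := by rw [fAlt]; norm_num

-- fAlt satisfies the uniform one-digit recursion for every positive s
theorem fAlt_eq (s : Int) (h : 0 < s) :
    fAlt s = min (s % 10 + fAlt (s / 10)) ((10 - s % 10) + fAlt (s / 10 + 1)) := by
  rcases eq_or_lt_of_le (show (1:Int) ≤ s by omega) with h1 | h1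
  · rw [← h1]; norm_num [fAlt_one, fAlt_zero]
  · rw [fAlt]
    rw [dif_neg (by omega), dif_neg (by omega)]
    rw [PySem.Int.floordiv_eq_ediv_of_pos (by omega : (0:Int) < 10),
        PySem.Int.mod_eq_emod_of_pos (by omega : (0:Int) < 10)]

-- the four coupled facts about moving one floor up, by strong induction
theorem fAlt_key : ∀ n : Nat, ∀ s : Int, s.toNat = n → 0 ≤ s →
    (fAlt (s + 1) ≤ fAlt s + 1 ∧ fAlt s ≤ fAlt (s + 1) + 1 ∧
     (5 ≤ s % 10 → fAlt (s + 1) ≤ fAlt s) ∧ (s % 10 < 5 → fAlt s ≤ fAlt (s + 1))) := by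
  intro n
  induction n using Nat.strong_induction_on with
  | _ n ih =>
    intro s hn hs
    rcases eq_or_lt_of_le hs with h0 | h0
    · rw [← h0]
      norm_num [fAlt_zero, fAlt_one]
    · -- s ≥ 1
      have hr0 : 0 ≤ s % 10 := Int.emod_nonneg s (by omega)
      have hr9 : s % 10 < 10 := Int.emod_lt_of_pos s (by omega)
      have hts : s = 10 * (s / 10) + s % 10 := by omega
      have ht0 : 0 ≤ s / 10 := Int.ediv_nonneg (by omega) (by omega)
      have htlt : (s / 10).toNat < n := by omega
      have hIH := ih _ htlt (s / 10) rfl ht0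
      rw [fAlt_eq s h0]
      by_cases hr : s % 10 ≤ 8
      · -- same higher digits: (s+1)/10 = s/10, (s+1)%10 = s%10 + 1
        have hq : (s + 1) / 10 = s / 10 := by omega
        have hm : (s + 1) % 10 = s % 10 + 1 := by omega
        rw [fAlt_eq (s + 1) (by omega), hq, hm]
        obtain ⟨a1, b1, -, -⟩ := hIH
        rw [Int.min_def, Int.min_def]
        refine ⟨?_, ?_, fun h5 => ?_, fun h5 => ?_⟩ <;> split_ifs <;> omega
      · -- s % 10 = 9 : carry
        have hr9' : s % 10 = 9 := by omega
        have hq : (s + 1) / 10 = s / 10 + 1 := by omega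
        have hm : (s + 1) % 10 = 0 := by omega
        have ht1 : (s / 10 + 1).toNat < n := by omega
        have hIH2 := ih _ ht1 (s / 10 + 1) rfl (by omega)
        rw [fAlt_eq (s + 1) (by omega), hq, hm]
        obtain ⟨a1, b1, -, -⟩ := hIH
        obtain ⟨a2, b2, -, -⟩ := hIH2
        rw [Int.min_def, Int.min_def]
        refine ⟨?_, ?_, fun h5 => ?_, fun h5 => ?_⟩ <;> split_ifs <;> omega

-- A's greedy loop computes answer + fAlt storey
theorem go_eq_fAlt : ∀ n : Nat, ∀ s a : Int, s.toNat = n → solution_go s a = a + fAlt s := by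
  intro n
  induction n using Nat.strong_induction_on with
  | _ n ih =>
    intro s a hn
    by_cases h0 : 0 < s
    · have hr0 : 0 ≤ s % 10 := Int.emod_nonneg s (by omega)
      have hr9 : s % 10 < 10 := Int.emod_lt_of_pos s (by omega)
      have ht0 : 0 ≤ s / 10 := Int.ediv_nonneg (by omega) (by omega)
      have htlt : (s / 10).toNat < n := by omega
      obtain ⟨a1, b1, c1, d1⟩ := fAlt_key _ (s / 10) rfl ht0
      rw [solution_go]
      rw [dif_pos h0]
      rw [PySem.Int.floordiv_eq_ediv_of_pos (by omega : (0:Int) < 10),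
          PySem.Int.mod_eq_emod_of_pos (by omega : (0:Int) < 10),
          PySem.Int.mod_eq_emod_of_pos (by omega : (0:Int) < 10)]
      rw [fAlt_eq s h0]
      by_cases h1 : s % 10 > 5
      · have hs6 : 6 ≤ s := by omega
        rw [dif_pos h1, ih _ (by omega) _ _ rfl]
        rw [Int.min_def]; split_ifs <;> omega
      · rw [dif_neg h1]
        by_cases h2 : s % 10 = 5
        · rw [dif_pos h2]
          by_cases h3 : (s / 10) % 10 ≥ 5
          · have hs5 : 5 ≤ s := by omega
            rw [if_pos h3, ih _ (by omega) _ _ rfl]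
            have := c1 h3
            rw [Int.min_def]; split_ifs <;> omega
          · rw [if_neg h3, ih _ htlt _ _ rfl]
            have := d1 (by omega)
            rw [Int.min_def]; split_ifs <;> omega
        · rw [dif_neg h2, ih _ htlt _ _ rfl]
          rw [Int.min_def]; split_ifs <;> omega
    · rw [solution_go, dif_neg h0, fAlt_nonpos s (by omega)]; omega

-- ===== VERDICT (by name: the statement is the Claim_ definition above) =====
theorem solution_spec : Claim_equal_solution := by
  intro storey _
  unfold Spec_solution solution solution_alt
  rw [go_eq_fAlt _ storey 0 rfl]; omega
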